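-- pv_equiv track=rewrite | github.com/tomexiskandar/bintang | bintang/table_mem.py | _gen_print_line
-- ===== SOURCE A (Python) =====
-- def _gen_print_line(length, col_div_pos, square=False):
--     line_chars = []
--     if square:
--         for x in range(length):
--             if x in [0,length-1]:
--                 line_chars.append('+')
--             elif x  in col_div_pos:
--                 line_chars.append('+')
--             else:
--                 line_chars.append('-')
--     else:
--         for x in range(length):
--             if x  in col_div_pos:
--                 line_chars.append('+')
--             else:
--                 line_chars.append('-')
--     return ''.join(line_chars)
-- ===== SOURCE B (Python) =====
-- def _gen_print_line(length, col_div_pos, square=False):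
--     # Preallocate all dashes, then scatter '+' at in-range divider positions;
--     # square just pins both ends.
--     line = ['-'] * length
--     for pos in col_div_pos:
--         if 0 <= pos < length:
--             line[pos] = '+'
--     if square and length > 0:
--         line[0] = '+'
--         line[length - 1] = '+'
--     return ''.join(line)
-- ===== Notes on version B (the rewrite author's own statement) =====
-- stated objective: faster
-- what changed: Instead of scanning every column and testing membership of x in col_div_pos (and in [0,length-1] when square), B preallocates a dash line once and scatters '+' only at the in-range divider positions, pinning the two endpoints when square.
import Mathlib
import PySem

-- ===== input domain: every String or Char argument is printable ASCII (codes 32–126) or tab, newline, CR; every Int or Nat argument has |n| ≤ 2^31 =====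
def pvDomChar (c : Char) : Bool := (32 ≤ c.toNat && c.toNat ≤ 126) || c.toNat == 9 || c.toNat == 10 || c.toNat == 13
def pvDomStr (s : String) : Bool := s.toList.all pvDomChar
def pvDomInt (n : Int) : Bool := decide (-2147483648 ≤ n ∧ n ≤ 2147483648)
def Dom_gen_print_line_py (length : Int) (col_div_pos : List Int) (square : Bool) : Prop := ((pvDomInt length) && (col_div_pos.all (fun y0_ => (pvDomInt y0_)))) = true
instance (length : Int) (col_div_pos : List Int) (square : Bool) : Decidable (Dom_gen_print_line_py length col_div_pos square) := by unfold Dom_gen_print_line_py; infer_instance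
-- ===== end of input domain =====

-- B replaces A's per-column membership scan by preallocating a dash line and
-- scattering '+' at the divider positions (simpler traversal; return value only).

-- ===== PORT A =====
def gen_print_line_py (length : Int) (col_div_pos : List Int) (square : Bool) : String :=
  let line_chars : List Char :=
    if square then
      (PySem.List.pyRange 0 length 1).foldl (fun acc x =>
        if x ∈ ([0, length - 1] : List Int) then acc ++ ['+']
        else if x ∈ col_div_pos then acc ++ ['+']
        else acc ++ ['-']) []
    else
      (PySem.List.pyRange 0 length 1).foldl (fun acc x =>
        if x ∈ col_div_pos then acc ++ ['+'] else acc ++ ['-']) []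
  String.mk line_chars

-- ===== PORT B =====
-- the scatter loop of Source B: for pos in col_div_pos: if 0 <= pos < length: line[pos] = '+'
def pvScatter (length : Int) (col_div_pos : List Int) (line : List Char) : List Char :=
  col_div_pos.foldl (fun l pos => if 0 ≤ pos ∧ pos < length then l.set pos.toNat '+' else l) line

def gen_print_line_py_alt (length : Int) (col_div_pos : List Int) (square : Bool) : String :=
  let line0 := List.replicate length.toNat '-'
  let line1 := pvScatter length col_div_pos line0
  let line2 := if square ∧ 0 < length then (line1.set 0 '+').set (length.toNat - 1) '+' else line1
  String.mk line2

-- ===== PRECONDITION & SPEC =====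
def Spec_gen_print_line_py (length : Int) (col_div_pos : List Int) (square : Bool) (out : String) : Prop := out = gen_print_line_py_alt length col_div_pos square
instance (length : Int) (col_div_pos : List Int) (square : Bool) (out : String) : Decidable (Spec_gen_print_line_py length col_div_pos square out) := by unfold Spec_gen_print_line_py; infer_instance

-- ===== CLAIM (what is proved, stated in full; the proofs are below) =====
def Claim_equal_gen_print_line_py : Prop := ∀ (length : Int) (col_div_pos : List Int) (square : Bool), Dom_gen_print_line_py length col_div_pos square → Spec_gen_print_line_py length col_div_pos square (gen_print_line_py length col_div_pos square)

-- ===== LEMMAS AND PROOFS =====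

theorem pvScatter_length (L : Int) (ps : List Int) (l : List Char) :
    (pvScatter L ps l).length = l.length := by
  induction ps generalizing l with
  | nil => rfl
  | cons p ps ih =>
    simp only [pvScatter, List.foldl_cons] at *
    split <;> simp [ih]

theorem pvScatter_getElem? (L : Int) (ps : List Int) (l : List Char) (i : Nat)
    (h : i < l.length) :
    (pvScatter L ps l)[i]? = if ((i : Int) ∈ ps ∧ (i : Int) < L) then some '+' else l[i]? := by
  induction ps generalizing l with
  | nil => simp [pvScatter]
  | cons p ps ih =>
    simp only [pvScatter, List.foldl_cons]
    by_cases hc : 0 ≤ p ∧ p < L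
    · rw [if_pos hc]
      rw [show (List.foldl (fun l pos => if 0 ≤ pos ∧ pos < L then l.set pos.toNat '+' else l)
            (l.set p.toNat '+') ps) = pvScatter L ps (l.set p.toNat '+') from rfl]
      rw [ih (l.set p.toNat '+') (by simpa using h)]
      by_cases hpi : p = (i : Int)
      · have hpt : p.toNat = i := by omega
        have hiL : (i : Int) < L := by omega
        simp [hpi, hiL, List.getElem?_set, hpt, h]
      · have hpt : p.toNat ≠ i := by omega
        by_cases hm : (i : Int) ∈ ps ∧ (i : Int) < L
        · simp [hm, List.mem_cons]
        · have : ¬ ((i : Int) ∈ p :: ps ∧ (i : Int) < L) := by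
            simp only [List.mem_cons]
            tauto
          simp only [if_neg hm, if_neg this]
          simp [List.getElem?_set, hpt]
    · rw [if_neg hc]
      rw [show (List.foldl (fun l pos => if 0 ≤ pos ∧ pos < L then l.set pos.toNat '+' else l)
            l ps) = pvScatter L ps l from rfl]
      rw [ih l h]
      by_cases hm : (i : Int) ∈ ps ∧ (i : Int) < L
      · simp [hm, List.mem_cons]
      · have hcons : ¬ ((i : Int) ∈ p :: ps ∧ (i : Int) < L) := by
          rintro ⟨hmem, hL2⟩
          rcases List.mem_cons.mp hmem with hh | hh
          · exact hc ⟨by omega, by omega⟩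
          · exact hm ⟨hh, hL2⟩
        rw [if_neg hm, if_neg hcons]

-- A's append-loop is a map over the range
theorem pvA_list (L : Int) (ps : List Int) (g : Int → Char) (fld : List Char → Int → List Char)
    (hf : ∀ acc x, fld acc x = acc ++ [g x]) :
    (PySem.List.pyRange 0 L 1).foldl fld [] = (PySem.List.pyRange 0 L 1).map g := by
  have h : ∀ (xs : List Int) (acc : List Char), xs.foldl fld acc = acc ++ xs.map g := by
    intro xs
    induction xs with
    | nil => simp
    | cons x xs ih => intro acc; simp [hf, ih]
  rw [h]; rfl

theorem gen_eq (L : Int) (ps : List Int) (sq : Bool) :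
    gen_print_line_py L ps sq = gen_print_line_py_alt L ps sq := by
  unfold gen_print_line_py gen_print_line_py_alt
  have hlen1 : (pvScatter L ps (List.replicate L.toNat '-')).length = L.toNat := by
    rw [pvScatter_length]; simp
  cases sq with
  | false =>
    simp only [Bool.false_eq_true, if_false, false_and]
    rw [pvA_list L ps (fun x => if x ∈ ps then '+' else '-') _ (by intro acc x; split <;> simp_all)]
    refine congrArg String.mk ?_
    apply List.ext_getElem?
    intro i
    by_cases hi : i < L.toNat
    · rw [pvScatter_getElem? L ps _ i (by simp [hi])]
      rw [List.getElem?_map, PySem.List.getElem?_pyRange_one,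
        if_pos (by omega : i < (L - 0).toNat)]
      have hiL : (i : Int) < L := by omega
      by_cases hm : (i : Int) ∈ ps
      · simp [hm, hiL]
      · simp [hm, hiL, List.getElem?_replicate, hi]
    · have h2 : (pvScatter L ps (List.replicate L.toNat '-'))[i]? = none := by
        rw [List.getElem?_eq_none]; omega
      rw [h2, List.getElem?_map, PySem.List.getElem?_pyRange_one,
        if_neg (by omega : ¬ i < (L - 0).toNat)]
      rfl
  | true =>
    simp only [eq_self_iff_true, if_true, true_and]
    rw [pvA_list L ps
      (fun x => if x ∈ ([0, L - 1] : List Int) then '+' else if x ∈ ps then '+' else '-') _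
      (by intro acc x; split_ifs <;> simp_all)]
    by_cases hL : 0 < L
    · rw [if_pos hL]
      refine congrArg String.mk ?_
      apply List.ext_getElem?
      intro i
      by_cases hi : i < L.toNat
      · have hiL : (i : Int) < L := by omega
        rw [List.getElem?_map, PySem.List.getElem?_pyRange_one,
          if_pos (by omega : i < (L - 0).toNat)]
        have hset : (((pvScatter L ps (List.replicate L.toNat '-')).set 0 '+').set (L.toNat - 1) '+')[i]? =
            if i = L.toNat - 1 then some '+' else if i = 0 then some '+'
            else (pvScatter L ps (List.replicate L.toNat '-'))[i]? := by
          rw [List.getElem?_set, List.getElem?_set]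
          have hlt : i < ((pvScatter L ps (List.replicate L.toNat '-')).set 0 '+').length := by
            simp [hlen1, hi]
          by_cases h1 : L.toNat - 1 = i
          · simp [h1, hlt, hi]; omega
          · have h1' : i ≠ L.toNat - 1 := fun h => h1 h.symm
            rw [if_neg h1']
            by_cases h0 : (0 : Nat) = i
            · have hi0 : i = 0 := h0.symm
              subst hi0
              simp [hlen1, hi]
            · have h0' : i ≠ 0 := fun h => h0 h.symm
              simp [h0, h0', h1]
        rw [hset]
        by_cases he : (i : Int) = 0 ∨ (i : Int) = L - 1
        · have hmem : (0 : Int) + (i : Int) ∈ ([0, L - 1] : List Int) := by simp; omega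
          have : i = L.toNat - 1 ∨ i = 0 := by omega
          rcases this with h | h <;> simp [hmem, h] <;> simp_all
        · push_neg at he
          have hi0 : i ≠ 0 := by omega
          have hin : i ≠ L.toNat - 1 := by omega
          have hmem : (0 : Int) + (i : Int) ∉ ([0, L - 1] : List Int) := by simp; omega
          rw [if_neg hin, if_neg hi0,
             pvScatter_getElem? L ps _ i (by simp [hi])]
          by_cases hm : (i : Int) ∈ ps
          · simp [hm, hiL, hmem]
          · simp only [List.getElem?_replicate]
            simp [hm, hiL, hmem, hi]; simp_all
      · have h2 : ((((pvScatter L ps (List.replicate L.toNat '-')).set 0 '+').set (L.toNat - 1) '+'))[i]? = none := by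
          rw [List.getElem?_eq_none]; simp [hlen1]; omega
        rw [h2, List.getElem?_map, PySem.List.getElem?_pyRange_one,
          if_neg (by omega : ¬ i < (L - 0).toNat)]
        rfl
    · rw [if_neg hL]
      have hnil : pvScatter L ps (List.replicate L.toNat '-') = [] :=
        List.length_eq_zero_iff.mp (by rw [pvScatter_length]; simp; omega)
      rw [hnil]
      refine congrArg String.mk ?_
      apply List.ext_getElem?
      intro i
      rw [List.getElem?_map, PySem.List.getElem?_pyRange_one,
        if_neg (by omega : ¬ i < (L - 0).toNat)]
      rfl

-- ===== VERDICT (by name: the statement is the Claim_ definition above) =====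
theorem gen_print_line_py_spec : Claim_equal_gen_print_line_py := by
  intro L ps sq _
  unfold Spec_gen_print_line_py
  exact gen_eq L ps sq
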